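-- pv_equiv track=rewrite | github.com/jxau-kdd/CPDS | CPDS.py | calc_Lower_approximation
-- ===== SOURCE A (Python) =====
-- def calc_Lower_approximation(equival_classes, dec_classes):
--     sample_size = len(equival_classes)
--     dec_size = len(dec_classes)
--     count = 0
--     for i in range(sample_size):
--         equ_class = equival_classes[i]
--
--         for j in range(dec_size):
--             dec_class = dec_classes[j]
--             if set(equ_class) <= set(dec_class):
--                 count += 1
--     return count
-- ===== SOURCE B (Python) =====
-- def calc_Lower_approximation(equival_classes, dec_classes):
--     dec_sets = [set(d) for d in dec_classes]
--     total = 0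
--     for e in equival_classes:
--         cands = dec_sets
--         for x in e:
--             cands = [s for s in cands if x in s]
--         total += len(cands)
--     return total
-- ===== Notes on version B (the rewrite author's own statement) =====
-- stated objective: alternative
-- what changed: Instead of testing set(e) <= set(d) for every (equ,dec) pair (rebuilding both sets each time), B builds each decision set once and, per equivalence class, filters a shrinking candidate list of decision sets element by element, adding the number of survivors.
import Mathlib
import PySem

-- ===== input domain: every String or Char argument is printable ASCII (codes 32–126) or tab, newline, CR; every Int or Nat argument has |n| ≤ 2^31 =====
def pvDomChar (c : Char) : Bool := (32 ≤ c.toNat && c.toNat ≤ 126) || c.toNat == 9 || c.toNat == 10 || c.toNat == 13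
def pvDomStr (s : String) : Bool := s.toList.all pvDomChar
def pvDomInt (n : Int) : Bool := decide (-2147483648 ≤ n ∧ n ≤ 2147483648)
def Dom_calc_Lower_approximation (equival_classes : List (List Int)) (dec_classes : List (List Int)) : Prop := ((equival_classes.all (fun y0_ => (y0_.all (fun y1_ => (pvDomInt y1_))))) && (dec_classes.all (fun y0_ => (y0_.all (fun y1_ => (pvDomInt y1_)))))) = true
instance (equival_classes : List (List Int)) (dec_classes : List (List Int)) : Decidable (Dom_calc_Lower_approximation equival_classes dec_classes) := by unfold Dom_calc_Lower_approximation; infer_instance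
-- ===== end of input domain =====

-- B builds each decision set once and, per equivalence class, prunes a candidate list of
-- decision sets element by element, instead of A's per-pair set(e) <= set(d) tests (objective: alternative).

-- ===== PORT A =====
-- A's 'for i in range(len(xs)): x = xs[i]' loops read the lists front to back; ported as folds over the lists themselves (exact).
def calc_Lower_approximation (equival_classes : List (List Int)) (dec_classes : List (List Int)) : Int :=
  equival_classes.foldl (fun count equ_class =>
    dec_classes.foldl (fun count dec_class =>
      if PySem.Set.issubset (PySem.Set.ofList equ_class) (PySem.Set.ofList dec_class) then count + 1 else count)
      count) 0

-- ===== PORT B =====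
def calc_Lower_approximation_alt (equival_classes : List (List Int)) (dec_classes : List (List Int)) : Int :=
  let dec_sets : List (PySem.Set Int) := dec_classes.map (fun d => PySem.Set.ofList d)
  equival_classes.foldl (fun total e =>
    total + ((e.foldl (fun cands x => cands.filter (fun s => PySem.Set.contains s x)) dec_sets).length : Int)) 0

-- ===== PRECONDITION & SPEC =====
def Spec_calc_Lower_approximation (equival_classes : List (List Int)) (dec_classes : List (List Int)) (out : Int) : Prop := out = calc_Lower_approximation_alt equival_classes dec_classes
instance (equival_classes : List (List Int)) (dec_classes : List (List Int)) (out : Int) : Decidable (Spec_calc_Lower_approximation equival_classes dec_classes out) := by unfold Spec_calc_Lower_approximation; infer_instance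

-- ===== CLAIM (what is proved, stated in full; the proofs are below) =====
def Claim_equal_calc_Lower_approximation : Prop := ∀ (equival_classes : List (List Int)) (dec_classes : List (List Int)), Dom_calc_Lower_approximation equival_classes dec_classes → Spec_calc_Lower_approximation equival_classes dec_classes (calc_Lower_approximation equival_classes dec_classes)

-- ===== LEMMAS AND PROOFS =====

-- Repeated filtering by each element's predicate is one filter by the conjunction.
theorem pv_foldl_filter {α β : Type} (e : List α) (L : List β) (p : α → β → Bool) :
    e.foldl (fun c x => c.filter (p x)) L = L.filter (fun s => e.all (fun x => p x s)) := by
  induction e generalizing L with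
  | nil => simp
  | cons x xs ih =>
    rw [List.foldl_cons, ih, List.filter_filter]
    apply List.filter_congr
    intro b _
    simp [Bool.and_comm]

-- A's conditional-count inner loop counts the decision classes passing the test.
theorem pv_foldl_count (dec : List (List Int)) (q : List Int → Bool) (count : Int) :
    dec.foldl (fun c d => if q d then c + 1 else c) count = count + ((dec.filter q).length : Int) := by
  induction dec generalizing count with
  | nil => simp
  | cons d ds ih =>
    rw [List.foldl_cons]
    by_cases h : q d = true
    · simp [h, ih]; ring
    · simp [h, ih]

-- A's subset test equals B's per-element membership test.
theorem pv_subset_eq (e d : List Int) :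
    PySem.Set.issubset (PySem.Set.ofList e) (PySem.Set.ofList d)
      = e.all (fun x => PySem.Set.contains (PySem.Set.ofList d) x) := by
  rw [Bool.eq_iff_iff]
  simp [PySem.Set.issubset_iff, PySem.Set.mem_ofList, PySem.Set.contains, List.all_eq_true]

theorem pv_main (equ dec : List (List Int)) (c : Int) :
    equ.foldl (fun count equ_class =>
      dec.foldl (fun count dec_class =>
        if PySem.Set.issubset (PySem.Set.ofList equ_class) (PySem.Set.ofList dec_class) then count + 1 else count)
        count) c
    = equ.foldl (fun total e =>
        total + (((e.foldl (fun cands x => cands.filter (fun s => PySem.Set.contains s x))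
            (dec.map (fun d => PySem.Set.ofList d))).length : Int))) c := by
  induction equ generalizing c with
  | nil => rfl
  | cons e es ih =>
    rw [List.foldl_cons, List.foldl_cons, ih]
    congr 1
    rw [pv_foldl_count, pv_foldl_filter, List.filter_map, List.length_map]
    have hpq : List.filter (fun dec_class => PySem.Set.issubset (PySem.Set.ofList e) (PySem.Set.ofList dec_class)) dec
        = List.filter ((fun s => e.all fun x => PySem.Set.contains s x) ∘ fun d => PySem.Set.ofList d) dec :=
      List.filter_congr (fun d _ => pv_subset_eq e d)
    rw [hpq]

-- ===== VERDICT (by name: the statement is the Claim_ definition above) =====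
theorem calc_Lower_approximation_spec : Claim_equal_calc_Lower_approximation := by
  intro equ dec _
  unfold Spec_calc_Lower_approximation calc_Lower_approximation calc_Lower_approximation_alt
  exact pv_main equ dec 0
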